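-- pv_equiv track=rewrite | github.com/jhmatthews/bingo | bingo.py | deal_with_long_sentences
-- ===== SOURCE A (Python) =====
-- def deal_with_long_sentences (entry):
-- 	'''
-- 	only allow 5 words per line
-- 	'''
-- 	max_words_per_line = 5
-- 	words = entry.split()
-- 	nwords = len(words)
-- 	lines = (nwords // max_words_per_line) + 1
--
--
-- 	if lines == 1:
-- 		return entry
-- 	else:
-- 		new_entry = ""
-- 		for i in range(nwords):
-- 			new_entry += " " + words[i]
-- 			if ( (i+1) % max_words_per_line == 0) and (i != 0):
-- 				new_entry += "\n"
--
-- 	return new_entry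
-- ===== SOURCE B (Python) =====
-- def deal_with_long_sentences(entry):
-- 	'''
-- 	only allow 5 words per line
-- 	'''
-- 	words = entry.split()
-- 	if len(words) < 5:
-- 		return entry
-- 	parts = []
-- 	while words:
-- 		chunk, words = words[:5], words[5:]
-- 		parts.append(" " + " ".join(chunk))
-- 		if len(chunk) == 5:
-- 			parts.append("\n")
-- 	return "".join(parts)
-- ===== Notes on version B (the rewrite author's own statement) =====
-- stated objective: simpler
-- what changed: B slices the word list into five-word chunks and emits each line by joining the chunk with single spaces (newline after every full chunk), replacing A's per-word string concatenation driven by a modulo-5 index counter.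
import Mathlib
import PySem

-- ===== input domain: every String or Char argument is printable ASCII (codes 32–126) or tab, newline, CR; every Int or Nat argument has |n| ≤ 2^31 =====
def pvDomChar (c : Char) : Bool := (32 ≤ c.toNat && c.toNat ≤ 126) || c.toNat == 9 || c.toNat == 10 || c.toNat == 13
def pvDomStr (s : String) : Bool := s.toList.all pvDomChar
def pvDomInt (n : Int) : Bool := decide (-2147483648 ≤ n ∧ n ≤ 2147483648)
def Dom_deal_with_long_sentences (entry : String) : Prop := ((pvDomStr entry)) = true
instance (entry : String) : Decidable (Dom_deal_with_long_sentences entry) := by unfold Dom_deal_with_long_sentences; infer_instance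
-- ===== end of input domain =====

-- B rebuilds the text chunk-by-chunk (five-word slices joined per line) instead of A's
-- per-word concatenation with a modulo counter; objective: simpler.

-- ===== PORT A =====
def deal_with_long_sentences (entry : String) : String :=
  let max_words_per_line : Int := 5
  let words := PySem.Str.split₀ entry
  let nwords : Int := (words.length : Int)
  let lines : Int := PySem.Int.floordiv nwords max_words_per_line + 1
  if lines = 1 then
    entry
  else
    (PySem.List.pyRange 0 nwords 1).foldl
      (fun new_entry i =>
        let ne1 := new_entry ++ (" " ++ PySem.List.pyGetD words i "")
        if PySem.Int.mod (i + 1) max_words_per_line = 0 ∧ i ≠ 0 then ne1 ++ "\n" else ne1)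
      ""

-- ===== PORT B =====
-- the while loop of Source B: slice off the first five words, emit " " + " ".join(chunk)
-- and a "\n" after every full chunk, until the word list is exhausted
def dlsChunkParts (ws : List String) : List String :=
  if _h : ws = [] then []
  else
    let chunk := PySem.List.slice ws (some 0) (some 5)
    let rest := PySem.List.slice ws (some 5) none
    let line := " " ++ PySem.Str.join " " chunk
    if chunk.length = 5 then line :: "\n" :: dlsChunkParts rest
    else line :: dlsChunkParts rest
termination_by ws.length
decreasing_by
  all_goals
    rw [PySem.List.slice_from _ (by norm_num)]
    cases ws with
    | nil => simp_all
    | cons x t => simp only [List.length_drop, List.length_cons]; omega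

def deal_with_long_sentences_alt (entry : String) : String :=
  let words := PySem.Str.split₀ entry
  if words.length < 5 then entry
  else PySem.Str.join "" (dlsChunkParts words)

-- ===== PRECONDITION & SPEC =====
def Spec_deal_with_long_sentences (entry : String) (out : String) : Prop := out = deal_with_long_sentences_alt entry
instance (entry : String) (out : String) : Decidable (Spec_deal_with_long_sentences entry out) := by unfold Spec_deal_with_long_sentences; infer_instance

-- ===== CLAIM (what is proved, stated in full; the proofs are below) =====
def Claim_equal_deal_with_long_sentences : Prop := ∀ (entry : String), Dom_deal_with_long_sentences entry → Spec_deal_with_long_sentences entry (deal_with_long_sentences entry)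

-- ===== LEMMAS AND PROOFS =====

theorem jn_nil : PySem.Str.join "" ([] : List String) = "" := rfl

theorem jn_empty_cons (x : String) (xs : List String) :
    PySem.Str.join "" (x :: xs) = x ++ PySem.Str.join "" xs := by
  cases xs with
  | nil => simp [PySem.Str.join, PySem.Chars.join, List.intercalate]
  | cons y ys => simp [PySem.Str.join, PySem.Chars.join_cons_cons, String.ofList_append]

theorem jn_sep_cons (sep x y : String) (xs : List String) :
    PySem.Str.join sep (x :: y :: xs) = x ++ sep ++ PySem.Str.join sep (y :: xs) := by
  simp only [PySem.Str.join, List.map_cons, PySem.Chars.join_cons_cons, String.ofList_append]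
  simp [String.append_assoc]

theorem jn_single (sep x : String) : PySem.Str.join sep [x] = x := by
  simp [PySem.Str.join, PySem.Chars.join, List.intercalate]

theorem pymod5 (a : Int) : PySem.Int.mod a 5 = a % 5 := by
  simp [PySem.Int.mod, Int.fmod_eq_emod]

theorem chunkParts_nil : dlsChunkParts [] = [] := by rw [dlsChunkParts]; simp

theorem chunkParts_cons5 (a b c d e : String) (rest : List String) :
    dlsChunkParts (a :: b :: c :: d :: e :: rest) =
      (" " ++ PySem.Str.join " " [a, b, c, d, e]) :: "\n" :: dlsChunkParts rest := by
  rw [dlsChunkParts]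
  rw [dif_neg (by simp)]
  rw [PySem.List.slice_toNat _ (by norm_num) (by norm_num),
      PySem.List.slice_from _ (by norm_num : (0:Int) ≤ 5)]
  rw [show (a :: b :: c :: d :: e :: rest) = [a,b,c,d,e] ++ rest from rfl,
      show ((5:Int).toNat) = ([a,b,c,d,e] : List String).length from rfl]
  simp

theorem chunkParts_short (ws : List String) (h0 : ws ≠ []) (h5 : ws.length < 5) :
    dlsChunkParts ws = [" " ++ PySem.Str.join " " ws] := by
  rw [dlsChunkParts]
  rw [dif_neg h0]
  have hc : PySem.List.slice ws (some 0) (some 5) = ws := by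
    rw [PySem.List.slice_toNat _ (by norm_num) (by norm_num)]
    simp
    omega
  have hr : PySem.List.slice ws (some 5) none = [] := by
    rw [PySem.List.slice_from _ (by norm_num)]
    simp
    omega
  simp only [hc, hr, chunkParts_nil]
  rw [if_neg (by omega)]

-- A's loop, restated over `enumerate`: started at a word index that is a multiple
-- of five, it appends exactly the chunked text of the remaining words.
theorem foldA_eq (n : Nat) : ∀ (ws : List String), ws.length ≤ n → ∀ (k : Int), 0 ≤ k → ∀ (acc : String),
    (PySem.List.enumerate ws (5 * k)).foldl
      (fun new_entry p =>
        if (p.1 + 1) % 5 = 0 ∧ p.1 ≠ 0 then new_entry ++ (" " ++ p.2) ++ "\n"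
        else new_entry ++ (" " ++ p.2))
      acc
    = acc ++ PySem.Str.join "" (dlsChunkParts ws) := by
  induction n with
  | zero =>
    intro ws h k hk acc
    have : ws = [] := List.length_eq_zero_iff.mp (by omega)
    subst this
    simp [PySem.List.enumerate, chunkParts_nil, jn_nil]
  | succ n ih =>
    intro ws h k hk acc
    match ws with
    | [] => simp [PySem.List.enumerate, chunkParts_nil, jn_nil]
    | [a] =>
      simp only [PySem.List.enumerate, List.foldl]
      rw [if_neg (by omega)]
      rw [chunkParts_short _ (by simp) (by simp), jn_empty_cons, jn_nil, jn_single]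
      simp
    | [a, b] =>
      simp only [PySem.List.enumerate, List.foldl]
      rw [if_neg (by omega), if_neg (by omega)]
      rw [chunkParts_short _ (by simp) (by simp), jn_empty_cons, jn_nil, jn_sep_cons, jn_single]
      simp [String.append_assoc]
    | [a, b, c] =>
      simp only [PySem.List.enumerate, List.foldl]
      rw [if_neg (by omega), if_neg (by omega), if_neg (by omega)]
      rw [chunkParts_short _ (by simp) (by simp), jn_empty_cons, jn_nil, jn_sep_cons, jn_sep_cons, jn_single]
      simp [String.append_assoc]
    | [a, b, c, d] =>
      simp only [PySem.List.enumerate, List.foldl]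
      rw [if_neg (by omega), if_neg (by omega), if_neg (by omega), if_neg (by omega)]
      rw [chunkParts_short _ (by simp) (by simp), jn_empty_cons, jn_nil, jn_sep_cons, jn_sep_cons, jn_sep_cons, jn_single]
      simp [String.append_assoc]
    | a :: b :: c :: d :: e :: rest =>
      simp only [PySem.List.enumerate, List.foldl]
      rw [if_pos (show (5*k+1+1+1+1+1) % 5 = 0 ∧ 5*k+1+1+1+1 ≠ 0 by constructor <;> omega),
          if_neg (show ¬((5*k+1+1+1+1) % 5 = 0 ∧ 5*k+1+1+1 ≠ 0) by omega),
          if_neg (show ¬((5*k+1+1+1) % 5 = 0 ∧ 5*k+1+1 ≠ 0) by omega),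
          if_neg (show ¬((5*k+1+1) % 5 = 0 ∧ 5*k+1 ≠ 0) by omega),
          if_neg (show ¬((5*k+1) % 5 = 0 ∧ 5*k ≠ 0) by omega)]
      have h5 : 5 * k + 1 + 1 + 1 + 1 + 1 = 5 * (k + 1) := by ring
      rw [h5, ih rest (by simp only [List.length_cons] at h; omega) (k + 1) (by omega)]
      rw [chunkParts_cons5, jn_empty_cons, jn_empty_cons,
          jn_sep_cons, jn_sep_cons, jn_sep_cons, jn_sep_cons, jn_single]
      simp [String.append_assoc]

-- A's comprehension-free loop over indices is the loop over (index, word) pairs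
theorem foldA_pyRange_eq_enumerate (words : List String) (acc : String) :
    (PySem.List.pyRange 0 ((words.length : Int)) 1).foldl
      (fun new_entry i =>
        if (i + 1) % 5 = 0 ∧ i ≠ 0 then new_entry ++ (" " ++ PySem.List.pyGetD words i "") ++ "\n"
        else new_entry ++ (" " ++ PySem.List.pyGetD words i ""))
      acc
    = (PySem.List.enumerate words 0).foldl
      (fun new_entry p =>
        if (p.1 + 1) % 5 = 0 ∧ p.1 ≠ 0 then new_entry ++ (" " ++ p.2) ++ "\n"
        else new_entry ++ (" " ++ p.2))
      acc := by
  rw [PySem.List.enumerate_eq_map_pyRange words ""]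
  rw [List.foldl_map]
  rfl

-- ===== VERDICT (by name: the statement is the Claim_ definition above) =====
theorem deal_with_long_sentences_spec : Claim_equal_deal_with_long_sentences := by
  intro entry _
  unfold Spec_deal_with_long_sentences deal_with_long_sentences deal_with_long_sentences_alt
  set words := PySem.Str.split₀ entry with hw
  simp only [pymod5]
  by_cases hlt : words.length < 5
  · rw [if_pos, if_pos hlt]
    simp [PySem.Int.floordiv, Int.fdiv_eq_ediv]
    omega
  · rw [if_neg, if_neg hlt]
    · rw [foldA_pyRange_eq_enumerate]
      have h0 : PySem.List.enumerate words 0 = PySem.List.enumerate words (5 * 0) := by norm_num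
      rw [h0, foldA_eq words.length words le_rfl 0 le_rfl ""]
      rw [String.empty_append]
    · simp [PySem.Int.floordiv, Int.fdiv_eq_ediv]
      omega
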